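-- pv_equiv track=rewrite | github.com/mgraczyk/HomeConfig | scripts/find_close_stores.py | findOverlapping
-- ===== SOURCE A (Python) =====
-- from collections import defaultdict
-- from operator import itemgetter
--
-- def findOverlapping(storeLog, threshold):
--     storeAddrs = defaultdict(list)
--
--     storeLog.sort(key=itemgetter(4))
--
--     for store in storeLog:
--         storeAddrs[store[0]].append(store[1:])
--
--     minDist = { hex(addr):
--             min([abs(stores[i][3] - stores[i-1][3]) for i in range(1, len(stores)) if stores[i][1] != stores[i-1][1]] or [threshold+1])
--             for addr, stores in storeAddrs.items()}
--
--     return (addr for addr, dist in minDist.items() if dist < threshold)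
-- ===== SOURCE B (Python) =====
-- # B: single pass over the sorted log with running-min per address (no per-address list building).
-- # Like A, sorts storeLog in place (observable mutation, same as A's).
-- def findOverlapping(storeLog, threshold):
--     storeLog.sort(key=lambda s: s[4])
--     prev = {}
--     best = {}
--     for store in storeLog:
--         addr = store[0]
--         if addr in prev:
--             plabel, pkey = prev[addr]
--             if plabel != store[2]:
--                 best[addr] = min(best[addr], abs(store[4] - pkey))
--         else:
--             best[addr] = threshold + 1
--         prev[addr] = (store[2], store[4])
--     return (hex(addr) for addr in best if best[addr] < threshold)
-- ===== Notes on version B (the rewrite author's own statement) =====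
-- stated objective: alternative
-- what changed: Replaces A's defaultdict of per-address store lists plus a second dict-comprehension pass that re-scans each list by index with a single pass over the sorted log that keeps only the previous (label,key) and a running minimum per address.
import Mathlib
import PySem

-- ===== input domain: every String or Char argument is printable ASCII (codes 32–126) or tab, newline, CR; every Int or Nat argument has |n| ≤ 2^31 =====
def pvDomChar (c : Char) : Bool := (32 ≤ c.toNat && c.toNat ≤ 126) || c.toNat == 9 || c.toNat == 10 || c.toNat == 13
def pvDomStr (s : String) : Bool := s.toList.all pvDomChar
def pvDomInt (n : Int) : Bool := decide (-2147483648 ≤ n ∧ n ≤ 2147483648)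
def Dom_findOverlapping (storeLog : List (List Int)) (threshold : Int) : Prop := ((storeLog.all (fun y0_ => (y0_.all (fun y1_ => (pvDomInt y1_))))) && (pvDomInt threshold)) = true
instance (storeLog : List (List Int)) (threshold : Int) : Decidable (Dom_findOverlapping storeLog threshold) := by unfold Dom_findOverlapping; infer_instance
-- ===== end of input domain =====

-- B is a single pass over the sorted log keeping a running minimum per address instead of
-- building per-address lists and scanning them in a second pass (objective: alternative).
-- Like A, the Python B sorts storeLog in place; the equivalence proved here is about the return value.

-- shared helper: Python's hex(n) ('-0x…' for negative, '0x0' for zero), built as one List Char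
def pyHexDigit (n : Nat) : Char :=
  (['0','1','2','3','4','5','6','7','8','9','a','b','c','d','e','f']).getD n '0'

def pyHexDigits (n : Nat) : List Char :=
  if _h : n < 16 then [pyHexDigit n]
  else pyHexDigits (n / 16) ++ [pyHexDigit (n % 16)]
  termination_by n
  decreasing_by exact Nat.div_lt_self (by omega) (by omega)

def pyHex (n : Int) : String :=
  if n < 0 then String.ofList ('-' :: '0' :: 'x' :: pyHexDigits n.natAbs)
  else String.ofList ('0' :: 'x' :: pyHexDigits n.toNat)

-- ===== PORT A =====
def findOverlapping (storeLog : List (List Int)) (threshold : Int) : List String :=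
  let sortedLog := PySem.List.sorted storeLog (fun s => PySem.List.pyGetD s 4 0)
  let storeAddrs : PySem.Dict Int (List (List Int)) := sortedLog.foldl
    (fun d s => d.modify (PySem.List.pyGetD s 0 0) []
      (fun l => l ++ [PySem.List.slice s (some 1) none])) PySem.Dict.empty
  let minDist : List (String × Int) := storeAddrs.items.map (fun p =>
    (pyHex p.1,
      let cands := ((PySem.List.pyRange 1 (p.2.length : Int) 1).filter (fun i =>
          PySem.List.pyGetD (PySem.List.pyGetD p.2 i []) 1 0 !=
          PySem.List.pyGetD (PySem.List.pyGetD p.2 (i-1) []) 1 0)).map (fun i =>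
          |PySem.List.pyGetD (PySem.List.pyGetD p.2 i []) 3 0 -
           PySem.List.pyGetD (PySem.List.pyGetD p.2 (i-1) []) 3 0|)
      let cands := if cands = [] then [threshold + 1] else cands
      (PySem.List.min? cands (fun x => x)).getD 0))
  (minDist.filter (fun p => decide (p.2 < threshold))).map (fun p => p.1)

-- ===== PORT B =====
-- loop body of B's single pass: state = (prev, best)
def bStep (threshold : Int) (pb : PySem.Dict Int (Int × Int) × PySem.Dict Int Int)
    (s : List Int) : PySem.Dict Int (Int × Int) × PySem.Dict Int Int :=
  let addr := PySem.List.pyGetD s 0 0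
  match pb.1.get? addr with
  | some pv =>
      (pb.1.insert addr (PySem.List.pyGetD s 2 0, PySem.List.pyGetD s 4 0),
       if pv.1 != PySem.List.pyGetD s 2 0 then
         pb.2.insert addr (min (pb.2.getD addr 0) |PySem.List.pyGetD s 4 0 - pv.2|)
       else pb.2)
  | none =>
      (pb.1.insert addr (PySem.List.pyGetD s 2 0, PySem.List.pyGetD s 4 0),
       pb.2.insert addr (threshold + 1))

def findOverlapping_alt (storeLog : List (List Int)) (threshold : Int) : List String :=
  let sortedLog := PySem.List.sorted storeLog (fun s => PySem.List.pyGetD s 4 0)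
  let st := sortedLog.foldl (bStep threshold) (PySem.Dict.empty, PySem.Dict.empty)
  (st.2.keys.filter (fun a => decide (st.2.getD a 0 < threshold))).map (fun a => pyHex a)

-- ===== PRECONDITION & SPEC =====
-- Pre_ excludes exactly the inputs on which A raises IndexError: a row with fewer than 5 fields
-- (itemgetter(4) / store[4] fails during the sort in both A and B).
def Pre_findOverlapping (storeLog : List (List Int)) (_threshold : Int) : Prop :=
  ∀ s ∈ storeLog, 5 ≤ s.length
instance (storeLog : List (List Int)) (threshold : Int) : Decidable (Pre_findOverlapping storeLog threshold) := by unfold Pre_findOverlapping; infer_instance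

def pvWitness_findOverlapping : List (List Int) × Int :=
  ([[1, 2, 3, 4, 5], [1, 9, 8, 7, 6], [2, 0, 3, 0, 9]], 10)

def Spec_findOverlapping (storeLog : List (List Int)) (threshold : Int) (out : List String) : Prop := out = findOverlapping_alt storeLog threshold
instance (storeLog : List (List Int)) (threshold : Int) (out : List String) : Decidable (Spec_findOverlapping storeLog threshold out) := by unfold Spec_findOverlapping; infer_instance

-- ===== CLAIM (what is proved, stated in full; the proofs are below) =====
def Claim_equal_findOverlapping : Prop := ∀ (storeLog : List (List Int)) (threshold : Int), Dom_findOverlapping storeLog threshold → Pre_findOverlapping storeLog threshold → Spec_findOverlapping storeLog threshold (findOverlapping storeLog threshold)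

-- ===== LEMMAS AND PROOFS =====

def key0 (s : List Int) : Int := PySem.List.pyGetD s 0 0
def lbl (s : List Int) : Int := PySem.List.pyGetD s 2 0
def ky (s : List Int) : Int := PySem.List.pyGetD s 4 0
def info (s : List Int) : Int × Int := (lbl s, ky s)
def grp (a : Int) (L : List (List Int)) : List (List Int) := L.filter (fun s => key0 s == a)
def candPairs (G : List (List Int)) : List Int :=
  ((G.zip G.tail).filter (fun q => lbl q.2 != lbl q.1)).map (fun q => |ky q.2 - ky q.1|)
def stepK (t : Int) (st : Option (Int × Int) × Option Int) (s : List Int) :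
    Option (Int × Int) × Option Int :=
  match st.1 with
  | some pv => (some (info s),
      if pv.1 != lbl s then some (min (st.2.getD 0) |ky s - pv.2|) else st.2)
  | none => (some (info s), some (t + 1))

lemma foldK_fst (t : Int) (G : List (List Int)) (st : Option (Int × Int) × Option Int) :
    (G.foldl (stepK t) st).1 = match G.getLast? with
      | some u => some (info u) | none => st.1 := by
  induction G using List.reverseRecOn with
  | nil => simp
  | append_singleton G u ih =>
      rw [List.foldl_append]
      cases h : (G.foldl (stepK t) st).1 <;> simp [stepK, h]

lemma grp_append (a : Int) (L : List (List Int)) (s : List Int) :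
    grp a (L ++ [s]) = grp a L ++ if key0 s == a then [s] else [] := by
  cases h : (key0 s == a) <;> simp [grp, List.filter_append, List.filter, h]

lemma mem_map_key0_iff (a : Int) (L : List (List Int)) :
    a ∈ L.map key0 ↔ grp a L ≠ [] := by
  simp [grp, List.filter_eq_nil_iff]

lemma candPairs_cons_cons (s x : List Int) (xs : List (List Int)) :
    candPairs (s :: x :: xs) =
      (if lbl x != lbl s then [|ky x - ky s|] else []) ++ candPairs (x :: xs) := by
  simp [candPairs, List.filter_cons]
  split <;> simp

lemma foldK_val (t : Int) (G : List (List Int)) :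
    ∀ (s : List Int) (m : Int),
    (G.foldl (stepK t) (some (info s), some m)).2 = some ((candPairs (s :: G)).foldl min m) := by
  induction G with
  | nil => intro s m; simp [candPairs]
  | cons x xs ih =>
      intro s m
      rw [candPairs_cons_cons, List.foldl_append]
      simp only [List.foldl_cons, stepK, info]
      by_cases h : lbl s = lbl x
      · have : (lbl x != lbl s) = false := by simp [bne, h]
        simp only [h, bne_self_eq_false]
        simpa using ih x m
      · have h1 : (lbl s != lbl x) = true := by simp [bne, h]
        have h2 : (lbl x != lbl s) = true := by simp [bne, Ne.symm h]
        simp only [h1, h2]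
        simpa using ih x (min m |ky x - ky s|)

lemma foldK_snd_isSome (t : Int) (G : List (List Int)) (h : G ≠ []) :
    (G.foldl (stepK t) (none, none)).2.isSome := by
  cases G with
  | nil => exact absurd rfl h
  | cons g G' =>
      have : stepK t (none, none) g = (some (info g), some (t+1)) := by simp [stepK]
      rw [List.foldl_cons, this, foldK_val]
      simp

lemma keys_insert_dict {κ ν : Type} [BEq κ] [LawfulBEq κ] (d : PySem.Dict κ ν) (k : κ) (v : ν) :
    (d.insert k v).keys = if d.contains k then d.keys else d.keys ++ [k] := by
  unfold PySem.Dict.insert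
  split
  · simp only [PySem.Dict.keys, List.map_map]
    apply List.map_congr_left
    intro p _
    by_cases h : p.1 == k
    · simp [h]; exact (eq_of_beq h).symm
    · simp [h]
  · simp [PySem.Dict.keys]

lemma contains_iff_get?_isSome {κ ν : Type} [BEq κ] [LawfulBEq κ] (d : PySem.Dict κ ν) (k : κ) :
    d.contains k = (d.get? k).isSome := by
  simp [PySem.Dict.contains, PySem.Dict.get?]
  induction d.items with
  | nil => simp
  | cons p l ih => by_cases h : p.1 == k <;> simp [h, ih]

lemma B_state (t : Int) (L : List (List Int)) :
    (∀ a, (L.foldl (bStep t) (PySem.Dict.empty, PySem.Dict.empty)).1.get? a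
            = ((grp a L).foldl (stepK t) (none, none)).1
        ∧ (L.foldl (bStep t) (PySem.Dict.empty, PySem.Dict.empty)).2.get? a
            = ((grp a L).foldl (stepK t) (none, none)).2)
    ∧ (L.foldl (bStep t) (PySem.Dict.empty, PySem.Dict.empty)).2.keys
        = PySem.Set.ofList (L.map key0) := by
  induction L using List.reverseRecOn with
  | nil =>
      constructor
      · intro a; simp [grp, PySem.Dict.empty, PySem.Dict.get?]
      · simp [PySem.Dict.empty, PySem.Dict.keys, PySem.Set.ofList, PySem.Set.empty]
  | append_singleton L s ih =>
      obtain ⟨ihget, ihkeys⟩ := ih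
      set r := L.foldl (bStep t) (PySem.Dict.empty, PySem.Dict.empty) with hr
      have hkey : PySem.List.pyGetD s 0 0 = key0 s := rfl
      have hinfo : (PySem.List.pyGetD s 2 0, PySem.List.pyGetD s 4 0) = info s := rfl
      rw [List.foldl_append, List.map_append, List.foldl_cons, List.foldl_nil]
      simp only [List.map_cons, List.map_nil]
      have hfold : ∀ a, grp a (L ++ [s]) = grp a L ++ if key0 s == a then [s] else [] :=
        fun a => grp_append a L s
      have hofk : PySem.Set.ofList (L.map key0 ++ [key0 s])
          = PySem.Set.add (PySem.Set.ofList (L.map key0)) (key0 s) := by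
        simp [PySem.Set.ofList, List.foldl_append]
      by_cases hG : grp (key0 s) L = []
      · -- first occurrence of this address
        have hnone : r.1.get? (key0 s) = none := by rw [(ihget _).1, hG]; simp
        have hsnone : r.2.get? (key0 s) = none := by rw [(ihget _).2, hG]; simp
        have hbs : bStep t r s = (r.1.insert (key0 s) (info s), r.2.insert (key0 s) (t + 1)) := by
          simp only [bStep, hkey, hnone, hinfo]
        rw [hbs]
        constructor
        · intro a
          by_cases ha : a = key0 s
          · subst ha
            rw [hfold (key0 s), hG]
            simp only [List.nil_append, beq_self_eq_true]
            refine ⟨?_, ?_⟩ <;> rw [PySem.Dict.get?_insert_self] <;> simp [stepK]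
          · have hne : (key0 s == a) = false := by
              simp only [beq_eq_false_iff_ne]; exact fun h => ha h.symm
            rw [hfold a, hne]
            simp only [Bool.false_eq_true, if_false, List.append_nil]
            rw [PySem.Dict.get?_insert_of_ne _ _ ha, PySem.Dict.get?_insert_of_ne _ _ ha]
            exact ihget a
        · have hc : r.2.contains (key0 s) = false := by
            rw [contains_iff_get?_isSome, hsnone]; rfl
          rw [keys_insert_dict, hc, if_neg (by decide), ihkeys, hofk]
          have hmem : ¬ key0 s ∈ PySem.Set.ofList (L.map key0) := by
            rw [PySem.Set.mem_ofList]
            exact fun h => (mem_map_key0_iff _ L).mp h hG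
          simp [PySem.Set.add, hmem]
      · -- this address was seen before
        obtain ⟨pv, hpv⟩ : ∃ pv, r.1.get? (key0 s) = some pv := by
          rw [(ihget _).1, foldK_fst]
          cases hgl : (grp (key0 s) L).getLast? with
          | none => exact absurd (List.getLast?_eq_none_iff.mp hgl) hG
          | some u => exact ⟨info u, rfl⟩
        have hfoldfst : ((grp (key0 s) L).foldl (stepK t) (none, none)).1 = some pv := by
          rw [← (ihget _).1]; exact hpv
        have hsome2 : (r.2.get? (key0 s)).isSome := by
          rw [(ihget _).2]; exact foldK_snd_isSome t _ hG
        have hbs : bStep t r s = (r.1.insert (key0 s) (info s),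
            if pv.1 != lbl s then
              r.2.insert (key0 s) (min (r.2.getD (key0 s) 0) |ky s - pv.2|)
            else r.2) := by
          simp only [bStep, hkey, hpv, hinfo]; rfl
        rw [hbs]
        constructor
        · intro a
          by_cases ha : a = key0 s
          · subst ha
            rw [hfold (key0 s), List.foldl_append]
            simp only [beq_self_eq_true]
            constructor
            · rw [PySem.Dict.get?_insert_self]
              simp [stepK, hfoldfst]
            · have hgd : r.2.getD (key0 s) 0
                  = (((grp (key0 s) L).foldl (stepK t) (none, none)).2).getD 0 := by
                simp [PySem.Dict.getD, (ihget (key0 s)).2]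
              cases hif : (pv.1 != lbl s) with
              | true =>
                  rw [if_pos rfl, PySem.Dict.get?_insert_self]
                  simp [stepK, hfoldfst, hif, hgd]
              | false =>
                  rw [if_neg (by decide), (ihget (key0 s)).2]
                  simp [stepK, hfoldfst, hif]
          · have hne : (key0 s == a) = false := by
              simp only [beq_eq_false_iff_ne]; exact fun h => ha h.symm
            rw [hfold a, hne]
            simp only [Bool.false_eq_true, if_false, List.append_nil]
            constructor
            · rw [PySem.Dict.get?_insert_of_ne _ _ ha]; exact (ihget a).1
            · cases hif : (pv.1 != lbl s)
              · rw [if_neg (by decide)]; exact (ihget a).2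
              · rw [if_pos rfl, PySem.Dict.get?_insert_of_ne _ _ ha]; exact (ihget a).2
        · have hkeys2 : (if pv.1 != lbl s then
              r.2.insert (key0 s) (min (r.2.getD (key0 s) 0) |ky s - pv.2|) else r.2).keys
                = r.2.keys := by
            cases hif : (pv.1 != lbl s)
            · rw [if_neg (by decide)]
            · rw [if_pos rfl, keys_insert_dict]
              have hc : r.2.contains (key0 s) = true := by
                rw [contains_iff_get?_isSome]; exact hsome2
              rw [hc, if_pos rfl]
          rw [hkeys2, ihkeys, hofk]
          have hmem : key0 s ∈ PySem.Set.ofList (L.map key0) := by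
            rw [PySem.Set.mem_ofList]
            exact (mem_map_key0_iff _ L).mpr hG
          simp [PySem.Set.add, hmem]

lemma zipBridge {α : Type} (ss : List α) (d : α) :
    (PySem.List.pyRange 1 (ss.length : Int) 1).map
      (fun i => (PySem.List.pyGetD ss (i-1) d, PySem.List.pyGetD ss i d)) = ss.zip ss.tail := by
  rw [PySem.List.pyRange_one, List.map_map]
  have hlen : ((ss.length : Int) - 1).toNat = ss.length - 1 := by omega
  rw [hlen]
  apply List.ext_getElem
  · simp [List.length_zip]
  · intro j h1 h2
    simp only [List.getElem_map, List.getElem_range, Function.comp_apply]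
    have hj : j < ss.length - 1 := by simpa using h1
    have e1 : (1 : Int) + (j : Int) - 1 = ((j : Nat) : Int) := by omega
    have e2 : (1 : Int) + (j : Int) = (((j+1 : Nat)) : Int) := by push_cast; omega
    rw [e1, e2, PySem.List.pyGetD_natCast, PySem.List.pyGetD_natCast]
    rw [List.getElem_zip]
    have hj1 : j < ss.length := by omega
    have hj2 : j + 1 < ss.length := by omega
    simp [hj1, hj2, List.getElem_tail]

def entry (s : List Int) : List Int := PySem.List.slice s (some 1) none
def aVal (t : Int) (ss : List (List Int)) : Int :=
  let cands := ((PySem.List.pyRange 1 (ss.length : Int) 1).filter (fun i =>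
      PySem.List.pyGetD (PySem.List.pyGetD ss i []) 1 0 !=
      PySem.List.pyGetD (PySem.List.pyGetD ss (i-1) []) 1 0)).map (fun i =>
      |PySem.List.pyGetD (PySem.List.pyGetD ss i []) 3 0 -
       PySem.List.pyGetD (PySem.List.pyGetD ss (i-1) []) 3 0|)
  let cands := if cands = [] then [t + 1] else cands
  (PySem.List.min? cands (fun x => x)).getD 0

lemma entry_lbl (s : List Int) : PySem.List.pyGetD (entry s) 1 0 = lbl s := by
  unfold entry lbl
  rw [PySem.List.slice_from s (by omega : (0:Int) ≤ 1)]
  cases s with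
  | nil => simp [PySem.List.pyGetD_ofNat']
  | cons x xs =>
      rw [show List.drop (Int.toNat 1) (x :: xs) = xs by simp,
        PySem.List.pyGetD_ofNat' xs 1 0, PySem.List.pyGetD_ofNat' (x :: xs) 2 0]
      simp [List.getD]

lemma entry_ky (s : List Int) : PySem.List.pyGetD (entry s) 3 0 = ky s := by
  unfold entry ky
  rw [PySem.List.slice_from s (by omega : (0:Int) ≤ 1)]
  cases s with
  | nil => simp [PySem.List.pyGetD_ofNat']
  | cons x xs =>
      rw [show List.drop (Int.toNat 1) (x :: xs) = xs by simp,
        PySem.List.pyGetD_ofNat' xs 3 0, PySem.List.pyGetD_ofNat' (x :: xs) 4 0]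
      simp [List.getD]

lemma cands_eq (t : Int) (G : List (List Int)) :
    aVal t (G.map entry) = (PySem.List.min?
      (if candPairs G = [] then [t + 1] else candPairs G) (fun x => x)).getD 0 := by
  unfold aVal
  have key : ((PySem.List.pyRange 1 ((G.map entry).length : Int) 1).filter (fun i =>
      PySem.List.pyGetD (PySem.List.pyGetD (G.map entry) i []) 1 0 !=
      PySem.List.pyGetD (PySem.List.pyGetD (G.map entry) (i-1) []) 1 0)).map (fun i =>
      |PySem.List.pyGetD (PySem.List.pyGetD (G.map entry) i []) 3 0 -
       PySem.List.pyGetD (PySem.List.pyGetD (G.map entry) (i-1) []) 3 0|) = candPairs G := by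
    have hcomp : ∀ (r : List Int) (P : List Int × List Int → Bool)
        (F : List Int × List Int → Int) (pair : Int → List Int × List Int),
        ((r.filter (fun i => P (pair i))).map (fun i => F (pair i)))
          = ((r.map pair).filter P).map F := by
      intro r P F pair
      rw [List.filter_map, List.map_map]
      rfl
    rw [hcomp (PySem.List.pyRange 1 ((G.map entry).length : Int) 1)
        (fun q => PySem.List.pyGetD q.2 1 0 != PySem.List.pyGetD q.1 1 0)
        (fun q => |PySem.List.pyGetD q.2 3 0 - PySem.List.pyGetD q.1 3 0|)
        (fun i => (PySem.List.pyGetD (G.map entry) (i-1) [], PySem.List.pyGetD (G.map entry) i []))]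
    rw [zipBridge (G.map entry) []]
    have htail : (G.map entry).tail = G.tail.map entry := by cases G <;> simp
    rw [htail, List.zip_map]
    rw [List.filter_map, List.map_map]
    unfold candPairs
    have hfc : List.filter ((fun q => PySem.List.pyGetD q.2 1 0 != PySem.List.pyGetD q.1 1 0)
          ∘ Prod.map entry entry) (G.zip G.tail)
        = List.filter (fun q => lbl q.2 != lbl q.1) (G.zip G.tail) := by
      apply List.filter_congr
      intro q _
      simp [Prod.map, entry_lbl]
    rw [hfc]
    apply List.map_congr_left
    intro q _
    simp [Prod.map, entry_ky]
  rw [key]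

lemma aVal_lt_iff_foldmin_lt (t : Int) (c : List Int) :
    ((PySem.List.min? (if c = [] then [t + 1] else c) (fun x => x)).getD 0 < t)
      ↔ (c.foldl min (t + 1) < t) := by
  cases c with
  | nil => simp [PySem.List.min?_id_cons]
  | cons x xs =>
      rw [if_neg (by simp)]
      rw [PySem.List.min?_id_cons]
      have : (x :: xs).foldl min (t + 1) = min (t + 1) (xs.foldl min x) := by
        rw [List.foldl_cons, List.foldl_assoc]
      rw [this]
      simp only [Option.getD_some, min_lt_iff]
      omega

-- ===== VERDICT (by name: the statement is the Claim_ definition above) =====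
theorem findOverlapping_spec : Claim_equal_findOverlapping := by
  unfold Claim_equal_findOverlapping
  intro storeLog t _hdom _hpre
  unfold Spec_findOverlapping findOverlapping findOverlapping_alt
  dsimp only
  generalize PySem.List.sorted storeLog (fun s => PySem.List.pyGetD s 4 0) = L'
  -- ---- A side ----
  set d := L'.foldl
    (fun d s => d.modify (PySem.List.pyGetD s 0 0) []
      (fun l => l ++ [PySem.List.slice s (some 1) none])) PySem.Dict.empty with hd
  have hkeys_d : d.keys = PySem.Set.ofList (L'.map key0) :=
    PySem.Dict.keys_foldl_modify_key L' (fun s => PySem.List.pyGetD s 0 0) []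
      (fun _ s => fun l => l ++ [PySem.List.slice s (some 1) none]) PySem.Dict.empty
  have hnodup : d.keys.Nodup :=
    PySem.Dict.nodup_keys_foldl_modify_key L' (fun s => PySem.List.pyGetD s 0 0) []
      (fun _ s => fun l => l ++ [PySem.List.slice s (some 1) none]) PySem.Dict.empty
      (by simp [PySem.Dict.empty, PySem.Dict.keys])
  have hgetD : ∀ a, d.getD a [] = (grp a L').map entry := by
    intro a
    have hfm : d = (L'.map (fun s => (key0 s, entry s))).foldl
        (fun d p => d.modify p.1 [] (fun l => l ++ [p.2])) PySem.Dict.empty := by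
      rw [List.foldl_map]; rfl
    rw [hfm, PySem.Dict.getD_foldl_modify_append]
    rw [List.filter_map, List.map_map]
    simp [PySem.Dict.empty, PySem.Dict.getD, PySem.Dict.get?, grp]
    rfl
  have hitems : d.items = d.keys.map (fun a => (a, d.getD a [])) :=
    PySem.Dict.items_eq_map_keys d hnodup []
  -- ---- B side ----
  obtain ⟨hget, hkeys⟩ := B_state t L'
  set st := L'.foldl (bStep t) (PySem.Dict.empty, PySem.Dict.empty) with hst
  -- keys coincide
  have hKK : d.keys = st.2.keys := by rw [hkeys_d, hkeys]
  -- rewrite the A result over keys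
  rw [hitems, List.map_map, List.filter_map, List.map_map, hKK]
  congr 1
  apply List.filter_congr
  intro a haK
  have hgrp : grp a L' ≠ [] := by
    apply (mem_map_key0_iff a L').mp
    rw [← PySem.Set.mem_ofList, ← hkeys]
    exact haK
  obtain ⟨g, G', hgG⟩ : ∃ g G', grp a L' = g :: G' := by
    cases hx : grp a L' with
    | nil => exact absurd hx hgrp
    | cons g G' => exact ⟨g, G', rfl⟩
  have hb : st.2.getD a 0 = (candPairs (grp a L')).foldl min (t + 1) := by
    rw [PySem.Dict.getD, (hget a).2, hgG, List.foldl_cons,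
      show stepK t (none, none) g = (some (info g), some (t + 1)) by simp [stepK],
      foldK_val]
    rfl
  show decide (aVal t (d.getD a []) < t) = decide (st.2.getD a 0 < t)
  rw [hgetD a, hb, cands_eq]
  exact decide_eq_decide.mpr (aVal_lt_iff_foldmin_lt t (candPairs (grp a L')))
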